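-- pv_equiv track=rewrite | github.com/JiangLab2020/DeepCodon | DeepCodon/src/tools/generate/corr.py | isprotein
-- ===== SOURCE A (Python) =====
-- def knowcodon(s):
--     if s == "UUU" or s == "UUC" or s == "TTT" or s == "TTC" or s == "T\nT\nT":
--         out = "苯丙氨酸 Phe/F"
--     elif s == "UUA" or s == "UUG" or s == "TTA" or s == "TTG":
--         out = "亮氨酸 Leu/L"
--     elif (
--         s == "UCU"
--         or s == "UCC"
--         or s == "UCA"
--         or s == "UCG"
--         or s == "TCT"
--         or s == "TCC"
--         or s == "TCA"
--         or s == "TCG"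
--     ):
--         out = "丝氨酸 Ser/S"
--     elif s == "UAU" or s == "UAC" or s == "TAT" or s == "TAC":
--         out = "酪氨酸 Tyr/Y"
--     elif s == "UAA" or s == "UAG" or s == "TAA" or s == "TAG":
--         out = "终止 Ter/end"
--     elif s == "UGU" or s == "UGC" or s == "TGT" or s == "TGC":
--         out = "半胱氨酸 Cys/C"
--     elif s == "UGA" or s == "TGA":
--         out = "终止 Ter/end"
--     elif s == "UGG" or s == "TGG":
--         out = "色氨酸 Trp/W"
--     elif (
--         s == "CUU"
--         or s == "CUC"
--         or s == "CUA"
--         or s == "CUG"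
--         or s == "CTT"
--         or s == "CTC"
--         or s == "CTA"
--         or s == "CTG"
--     ):
--         out = "亮氨酸 Leu/L"
--     elif s == "CCU" or s == "CCC" or s == "CCA" or s == "CCG" or s == "CCT":
--         out = "脯氨酸 Pro/P"
--     elif s == "CAU" or s == "CAC" or s == "CAT":
--         out = "组氨酸 His/H"
--     elif s == "CAA" or s == "CAG":
--         out = "谷氨酰胺 Gln/Q"
--     elif s == "CGU" or s == "CGC" or s == "CGA" or s == "CGG" or s == "CGT":
--         out = "精氨酸 Arg/R"
--     elif (
--         s == "AUU" or s == "AUC" or s == "AUA" or s == "ATT" or s == "ATC" or s == "ATA"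
--     ):
--         out = "异亮氨酸 IIe/I"
--     elif s == "AUG" or s == "ATG":
--         out = "甲硫氨酸 Met/M"
--     elif s == "ACU" or s == "ACC" or s == "ACA" or s == "ACG" or s == "ACT":
--         out = "苏氨酸 Thr/T"
--     elif s == "AAU" or s == "AAC" or s == "AAT":
--         out = "天冬酰胺 Asn/N"
--     elif s == "AAA" or s == "AAG":
--         out = "赖氨酸 Lys/K"
--     elif s == "AGU" or s == "AGC" or s == "AGT":
--         out = "丝氨酸 Ser/S"
--     elif s == "AGA" or s == "AGG":
--         out = "精氨酸 Arg/R"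
--     elif (
--         s == "GUU"
--         or s == "GUC"
--         or s == "GUA"
--         or s == "GUG"
--         or s == "GTT"
--         or s == "GTC"
--         or s == "GTA"
--         or s == "GTG"
--     ):
--         out = "缬氨酸 val/V"
--     elif s == "GCU" or s == "GCC" or s == "GCA" or s == "GCG" or s == "GCT":
--         out = "丙氨酸 Ala/A"
--     elif s == "GAU" or s == "GAC" or s == "GAT":
--         out = "天冬酰胺 Asp/D"
--     elif s == "GAA" or s == "GAG":
--         out = "谷氨酸 Glu/E"
--     elif s == "GGU" or s == "GGC" or s == "GGA" or s == "GGG" or s == "GGT":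
--         out = "甘氨酸 Gly/G"
--     else:
--         out = "不能识别"
--     return out
--
-- def isprotein(old, new):
--     oldList = [old[i : i + 3] for i in range(0, len(old), 3)]
--     newList = [new[i : i + 3] for i in range(0, len(new), 3)]
--
--     for i in range(max(len(oldList), len(newList))):
--         try:
--             p1 = knowcodon(oldList[i])
--             p2 = knowcodon(newList[i])
--             if p1 != p2:
--                 return "error"
--         except:
--             return "error"
--     return "right"
-- ===== SOURCE B (Python) =====
-- # Table-driven re-implementation: one codon->name dict and whole-list equality
-- # replace A's hand-written if-chain and indexed max-length loop with try/except.
-- CODON_NAME = {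
--     'UUU': '苯丙氨酸 Phe/F',
--     'UUC': '苯丙氨酸 Phe/F',
--     'TTT': '苯丙氨酸 Phe/F',
--     'TTC': '苯丙氨酸 Phe/F',
--     'T\nT\nT': '苯丙氨酸 Phe/F',
--     'UUA': '亮氨酸 Leu/L',
--     'UUG': '亮氨酸 Leu/L',
--     'TTA': '亮氨酸 Leu/L',
--     'TTG': '亮氨酸 Leu/L',
--     'UCU': '丝氨酸 Ser/S',
--     'UCC': '丝氨酸 Ser/S',
--     'UCA': '丝氨酸 Ser/S',
--     'UCG': '丝氨酸 Ser/S',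
--     'TCT': '丝氨酸 Ser/S',
--     'TCC': '丝氨酸 Ser/S',
--     'TCA': '丝氨酸 Ser/S',
--     'TCG': '丝氨酸 Ser/S',
--     'UAU': '酪氨酸 Tyr/Y',
--     'UAC': '酪氨酸 Tyr/Y',
--     'TAT': '酪氨酸 Tyr/Y',
--     'TAC': '酪氨酸 Tyr/Y',
--     'UAA': '终止 Ter/end',
--     'UAG': '终止 Ter/end',
--     'TAA': '终止 Ter/end',
--     'TAG': '终止 Ter/end',
--     'UGU': '半胱氨酸 Cys/C',
--     'UGC': '半胱氨酸 Cys/C',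
--     'TGT': '半胱氨酸 Cys/C',
--     'TGC': '半胱氨酸 Cys/C',
--     'UGA': '终止 Ter/end',
--     'TGA': '终止 Ter/end',
--     'UGG': '色氨酸 Trp/W',
--     'TGG': '色氨酸 Trp/W',
--     'CUU': '亮氨酸 Leu/L',
--     'CUC': '亮氨酸 Leu/L',
--     'CUA': '亮氨酸 Leu/L',
--     'CUG': '亮氨酸 Leu/L',
--     'CTT': '亮氨酸 Leu/L',
--     'CTC': '亮氨酸 Leu/L',
--     'CTA': '亮氨酸 Leu/L',
--     'CTG': '亮氨酸 Leu/L',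
--     'CCU': '脯氨酸 Pro/P',
--     'CCC': '脯氨酸 Pro/P',
--     'CCA': '脯氨酸 Pro/P',
--     'CCG': '脯氨酸 Pro/P',
--     'CCT': '脯氨酸 Pro/P',
--     'CAU': '组氨酸 His/H',
--     'CAC': '组氨酸 His/H',
--     'CAT': '组氨酸 His/H',
--     'CAA': '谷氨酰胺 Gln/Q',
--     'CAG': '谷氨酰胺 Gln/Q',
--     'CGU': '精氨酸 Arg/R',
--     'CGC': '精氨酸 Arg/R',
--     'CGA': '精氨酸 Arg/R',
--     'CGG': '精氨酸 Arg/R',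
--     'CGT': '精氨酸 Arg/R',
--     'AUU': '异亮氨酸 IIe/I',
--     'AUC': '异亮氨酸 IIe/I',
--     'AUA': '异亮氨酸 IIe/I',
--     'ATT': '异亮氨酸 IIe/I',
--     'ATC': '异亮氨酸 IIe/I',
--     'ATA': '异亮氨酸 IIe/I',
--     'AUG': '甲硫氨酸 Met/M',
--     'ATG': '甲硫氨酸 Met/M',
--     'ACU': '苏氨酸 Thr/T',
--     'ACC': '苏氨酸 Thr/T',
--     'ACA': '苏氨酸 Thr/T',
--     'ACG': '苏氨酸 Thr/T',
--     'ACT': '苏氨酸 Thr/T',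
--     'AAU': '天冬酰胺 Asn/N',
--     'AAC': '天冬酰胺 Asn/N',
--     'AAT': '天冬酰胺 Asn/N',
--     'AAA': '赖氨酸 Lys/K',
--     'AAG': '赖氨酸 Lys/K',
--     'AGU': '丝氨酸 Ser/S',
--     'AGC': '丝氨酸 Ser/S',
--     'AGT': '丝氨酸 Ser/S',
--     'AGA': '精氨酸 Arg/R',
--     'AGG': '精氨酸 Arg/R',
--     'GUU': '缬氨酸 val/V',
--     'GUC': '缬氨酸 val/V',
--     'GUA': '缬氨酸 val/V',
--     'GUG': '缬氨酸 val/V',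
--     'GTT': '缬氨酸 val/V',
--     'GTC': '缬氨酸 val/V',
--     'GTA': '缬氨酸 val/V',
--     'GTG': '缬氨酸 val/V',
--     'GCU': '丙氨酸 Ala/A',
--     'GCC': '丙氨酸 Ala/A',
--     'GCA': '丙氨酸 Ala/A',
--     'GCG': '丙氨酸 Ala/A',
--     'GCT': '丙氨酸 Ala/A',
--     'GAU': '天冬酰胺 Asp/D',
--     'GAC': '天冬酰胺 Asp/D',
--     'GAT': '天冬酰胺 Asp/D',
--     'GAA': '谷氨酸 Glu/E',
--     'GAG': '谷氨酸 Glu/E',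
--     'GGU': '甘氨酸 Gly/G',
--     'GGC': '甘氨酸 Gly/G',
--     'GGA': '甘氨酸 Gly/G',
--     'GGG': '甘氨酸 Gly/G',
--     'GGT': '甘氨酸 Gly/G',
-- }
--
--
-- def _translate(seq):
--     out = []
--     while seq:
--         out.append(CODON_NAME.get(seq[:3], "不能识别"))
--         seq = seq[3:]
--     return out
--
--
-- def isprotein(old, new):
--     return "right" if _translate(old) == _translate(new) else "error"
-- ===== Notes on version B (the rewrite author's own statement) =====
-- stated objective: simpler
-- what changed: Replaced the hand-written 25-branch codon if-chain and the indexed max-length loop with try/except early-exit by a single codon-to-name dictionary plus one whole-translation list-equality comparison (length mismatches that A caught via IndexError fall out of list inequality).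
import Mathlib
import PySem

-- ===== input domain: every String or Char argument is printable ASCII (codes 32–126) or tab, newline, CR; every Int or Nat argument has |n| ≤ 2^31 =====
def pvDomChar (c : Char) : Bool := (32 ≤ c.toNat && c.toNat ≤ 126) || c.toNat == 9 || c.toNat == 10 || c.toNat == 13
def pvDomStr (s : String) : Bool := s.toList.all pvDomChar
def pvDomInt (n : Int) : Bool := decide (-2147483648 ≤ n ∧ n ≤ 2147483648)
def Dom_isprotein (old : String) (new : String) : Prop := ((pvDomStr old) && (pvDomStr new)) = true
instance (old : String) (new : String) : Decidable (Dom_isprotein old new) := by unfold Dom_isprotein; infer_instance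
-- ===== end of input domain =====

-- B replaces A's hand-written codon if-chain and indexed max-length loop with try/except
-- by a single codon→name table and whole-translation equality; objective: simpler.

-- ===== PORT A =====
def knowcodon (s : String) : String :=
  if s = "UUU" ∨ s = "UUC" ∨ s = "TTT" ∨ s = "TTC" ∨ s = "T\nT\nT" then "苯丙氨酸 Phe/F"
  else if s = "UUA" ∨ s = "UUG" ∨ s = "TTA" ∨ s = "TTG" then "亮氨酸 Leu/L"
  else if s = "UCU" ∨ s = "UCC" ∨ s = "UCA" ∨ s = "UCG" ∨ s = "TCT" ∨ s = "TCC" ∨ s = "TCA" ∨ s = "TCG" then "丝氨酸 Ser/S"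
  else if s = "UAU" ∨ s = "UAC" ∨ s = "TAT" ∨ s = "TAC" then "酪氨酸 Tyr/Y"
  else if s = "UAA" ∨ s = "UAG" ∨ s = "TAA" ∨ s = "TAG" then "终止 Ter/end"
  else if s = "UGU" ∨ s = "UGC" ∨ s = "TGT" ∨ s = "TGC" then "半胱氨酸 Cys/C"
  else if s = "UGA" ∨ s = "TGA" then "终止 Ter/end"
  else if s = "UGG" ∨ s = "TGG" then "色氨酸 Trp/W"
  else if s = "CUU" ∨ s = "CUC" ∨ s = "CUA" ∨ s = "CUG" ∨ s = "CTT" ∨ s = "CTC" ∨ s = "CTA" ∨ s = "CTG" then "亮氨酸 Leu/L"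
  else if s = "CCU" ∨ s = "CCC" ∨ s = "CCA" ∨ s = "CCG" ∨ s = "CCT" then "脯氨酸 Pro/P"
  else if s = "CAU" ∨ s = "CAC" ∨ s = "CAT" then "组氨酸 His/H"
  else if s = "CAA" ∨ s = "CAG" then "谷氨酰胺 Gln/Q"
  else if s = "CGU" ∨ s = "CGC" ∨ s = "CGA" ∨ s = "CGG" ∨ s = "CGT" then "精氨酸 Arg/R"
  else if s = "AUU" ∨ s = "AUC" ∨ s = "AUA" ∨ s = "ATT" ∨ s = "ATC" ∨ s = "ATA" then "异亮氨酸 IIe/I"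
  else if s = "AUG" ∨ s = "ATG" then "甲硫氨酸 Met/M"
  else if s = "ACU" ∨ s = "ACC" ∨ s = "ACA" ∨ s = "ACG" ∨ s = "ACT" then "苏氨酸 Thr/T"
  else if s = "AAU" ∨ s = "AAC" ∨ s = "AAT" then "天冬酰胺 Asn/N"
  else if s = "AAA" ∨ s = "AAG" then "赖氨酸 Lys/K"
  else if s = "AGU" ∨ s = "AGC" ∨ s = "AGT" then "丝氨酸 Ser/S"
  else if s = "AGA" ∨ s = "AGG" then "精氨酸 Arg/R"
  else if s = "GUU" ∨ s = "GUC" ∨ s = "GUA" ∨ s = "GUG" ∨ s = "GTT" ∨ s = "GTC" ∨ s = "GTA" ∨ s = "GTG" then "缬氨酸 val/V"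
  else if s = "GCU" ∨ s = "GCC" ∨ s = "GCA" ∨ s = "GCG" ∨ s = "GCT" then "丙氨酸 Ala/A"
  else if s = "GAU" ∨ s = "GAC" ∨ s = "GAT" then "天冬酰胺 Asp/D"
  else if s = "GAA" ∨ s = "GAG" then "谷氨酸 Glu/E"
  else if s = "GGU" ∨ s = "GGC" ∨ s = "GGA" ∨ s = "GGG" ∨ s = "GGT" then "甘氨酸 Gly/G"
  else "不能识别"

def pyChunks (s : String) : List String :=
  (PySem.List.pyRange 0 (PySem.Str.len s) 3).map (fun i => PySem.Str.slice s (some i) (some (i + 3)))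

def isproteinLoop (xs ys : List String) : List Int → String
  | [] => "right"
  | i :: rest =>
    match PySem.List.pyGet? xs i, PySem.List.pyGet? ys i with
    | some a, some b => if knowcodon a ≠ knowcodon b then "error" else isproteinLoop xs ys rest
    | _, _ => "error"

def isprotein (old : String) (new : String) : String :=
  let oldList := pyChunks old
  let newList := pyChunks new
  isproteinLoop oldList newList (PySem.List.pyRange 0 (max (oldList.length : Int) (newList.length : Int)) 1)

-- ===== PORT B =====
def codonName : PySem.Dict String String := ⟨[
  ("UUU", "苯丙氨酸 Phe/F"),
  ("UUC", "苯丙氨酸 Phe/F"),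
  ("TTT", "苯丙氨酸 Phe/F"),
  ("TTC", "苯丙氨酸 Phe/F"),
  ("T\nT\nT", "苯丙氨酸 Phe/F"),
  ("UUA", "亮氨酸 Leu/L"),
  ("UUG", "亮氨酸 Leu/L"),
  ("TTA", "亮氨酸 Leu/L"),
  ("TTG", "亮氨酸 Leu/L"),
  ("UCU", "丝氨酸 Ser/S"),
  ("UCC", "丝氨酸 Ser/S"),
  ("UCA", "丝氨酸 Ser/S"),
  ("UCG", "丝氨酸 Ser/S"),
  ("TCT", "丝氨酸 Ser/S"),
  ("TCC", "丝氨酸 Ser/S"),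
  ("TCA", "丝氨酸 Ser/S"),
  ("TCG", "丝氨酸 Ser/S"),
  ("UAU", "酪氨酸 Tyr/Y"),
  ("UAC", "酪氨酸 Tyr/Y"),
  ("TAT", "酪氨酸 Tyr/Y"),
  ("TAC", "酪氨酸 Tyr/Y"),
  ("UAA", "终止 Ter/end"),
  ("UAG", "终止 Ter/end"),
  ("TAA", "终止 Ter/end"),
  ("TAG", "终止 Ter/end"),
  ("UGU", "半胱氨酸 Cys/C"),
  ("UGC", "半胱氨酸 Cys/C"),
  ("TGT", "半胱氨酸 Cys/C"),
  ("TGC", "半胱氨酸 Cys/C"),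
  ("UGA", "终止 Ter/end"),
  ("TGA", "终止 Ter/end"),
  ("UGG", "色氨酸 Trp/W"),
  ("TGG", "色氨酸 Trp/W"),
  ("CUU", "亮氨酸 Leu/L"),
  ("CUC", "亮氨酸 Leu/L"),
  ("CUA", "亮氨酸 Leu/L"),
  ("CUG", "亮氨酸 Leu/L"),
  ("CTT", "亮氨酸 Leu/L"),
  ("CTC", "亮氨酸 Leu/L"),
  ("CTA", "亮氨酸 Leu/L"),
  ("CTG", "亮氨酸 Leu/L"),
  ("CCU", "脯氨酸 Pro/P"),
  ("CCC", "脯氨酸 Pro/P"),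
  ("CCA", "脯氨酸 Pro/P"),
  ("CCG", "脯氨酸 Pro/P"),
  ("CCT", "脯氨酸 Pro/P"),
  ("CAU", "组氨酸 His/H"),
  ("CAC", "组氨酸 His/H"),
  ("CAT", "组氨酸 His/H"),
  ("CAA", "谷氨酰胺 Gln/Q"),
  ("CAG", "谷氨酰胺 Gln/Q"),
  ("CGU", "精氨酸 Arg/R"),
  ("CGC", "精氨酸 Arg/R"),
  ("CGA", "精氨酸 Arg/R"),
  ("CGG", "精氨酸 Arg/R"),
  ("CGT", "精氨酸 Arg/R"),
  ("AUU", "异亮氨酸 IIe/I"),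
  ("AUC", "异亮氨酸 IIe/I"),
  ("AUA", "异亮氨酸 IIe/I"),
  ("ATT", "异亮氨酸 IIe/I"),
  ("ATC", "异亮氨酸 IIe/I"),
  ("ATA", "异亮氨酸 IIe/I"),
  ("AUG", "甲硫氨酸 Met/M"),
  ("ATG", "甲硫氨酸 Met/M"),
  ("ACU", "苏氨酸 Thr/T"),
  ("ACC", "苏氨酸 Thr/T"),
  ("ACA", "苏氨酸 Thr/T"),
  ("ACG", "苏氨酸 Thr/T"),
  ("ACT", "苏氨酸 Thr/T"),
  ("AAU", "天冬酰胺 Asn/N"),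
  ("AAC", "天冬酰胺 Asn/N"),
  ("AAT", "天冬酰胺 Asn/N"),
  ("AAA", "赖氨酸 Lys/K"),
  ("AAG", "赖氨酸 Lys/K"),
  ("AGU", "丝氨酸 Ser/S"),
  ("AGC", "丝氨酸 Ser/S"),
  ("AGT", "丝氨酸 Ser/S"),
  ("AGA", "精氨酸 Arg/R"),
  ("AGG", "精氨酸 Arg/R"),
  ("GUU", "缬氨酸 val/V"),
  ("GUC", "缬氨酸 val/V"),
  ("GUA", "缬氨酸 val/V"),
  ("GUG", "缬氨酸 val/V"),
  ("GTT", "缬氨酸 val/V"),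
  ("GTC", "缬氨酸 val/V"),
  ("GTA", "缬氨酸 val/V"),
  ("GTG", "缬氨酸 val/V"),
  ("GCU", "丙氨酸 Ala/A"),
  ("GCC", "丙氨酸 Ala/A"),
  ("GCA", "丙氨酸 Ala/A"),
  ("GCG", "丙氨酸 Ala/A"),
  ("GCT", "丙氨酸 Ala/A"),
  ("GAU", "天冬酰胺 Asp/D"),
  ("GAC", "天冬酰胺 Asp/D"),
  ("GAT", "天冬酰胺 Asp/D"),
  ("GAA", "谷氨酸 Glu/E"),
  ("GAG", "谷氨酸 Glu/E"),
  ("GGU", "甘氨酸 Gly/G"),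
  ("GGC", "甘氨酸 Gly/G"),
  ("GGA", "甘氨酸 Gly/G"),
  ("GGG", "甘氨酸 Gly/G"),
  ("GGT", "甘氨酸 Gly/G")
]⟩

def translateChunks : List Char → List String
  | [] => []
  | c :: cs =>
    codonName.getD (String.ofList ((c :: cs).take 3)) "不能识别" :: translateChunks ((c :: cs).drop 3)
termination_by cs => cs.length
decreasing_by simp only [List.length_drop, List.length_cons]; omega

def isprotein_alt (old : String) (new : String) : String :=
  if translateChunks old.toList = translateChunks new.toList then "right" else "error"

-- ===== PRECONDITION & SPEC =====
def Spec_isprotein (old : String) (new : String) (out : String) : Prop := out = isprotein_alt old new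
instance (old : String) (new : String) (out : String) : Decidable (Spec_isprotein old new out) := by unfold Spec_isprotein; infer_instance

-- ===== CLAIM (what is proved, stated in full; the proofs are below) =====
def Claim_equal_isprotein : Prop := ∀ (old : String) (new : String), Dom_isprotein old new → Spec_isprotein old new (isprotein old new)

-- ===== LEMMAS AND PROOFS =====

-- A's per-codon translation (the if-chain) agrees with B's table lookup on every string.
set_option maxHeartbeats 2000000 in
theorem knowcodon_eq_getD (s : String) : knowcodon s = codonName.getD s "不能识别" := by
  by_cases h0 : s = "UUU"
  · subst h0; rfl
  by_cases h1 : s = "UUC"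
  · subst h1; rfl
  by_cases h2 : s = "TTT"
  · subst h2; rfl
  by_cases h3 : s = "TTC"
  · subst h3; rfl
  by_cases h4 : s = "T\nT\nT"
  · subst h4; rfl
  by_cases h5 : s = "UUA"
  · subst h5; rfl
  by_cases h6 : s = "UUG"
  · subst h6; rfl
  by_cases h7 : s = "TTA"
  · subst h7; rfl
  by_cases h8 : s = "TTG"
  · subst h8; rfl
  by_cases h9 : s = "UCU"
  · subst h9; rfl
  by_cases h10 : s = "UCC"
  · subst h10; rfl
  by_cases h11 : s = "UCA"
  · subst h11; rfl
  by_cases h12 : s = "UCG"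
  · subst h12; rfl
  by_cases h13 : s = "TCT"
  · subst h13; rfl
  by_cases h14 : s = "TCC"
  · subst h14; rfl
  by_cases h15 : s = "TCA"
  · subst h15; rfl
  by_cases h16 : s = "TCG"
  · subst h16; rfl
  by_cases h17 : s = "UAU"
  · subst h17; rfl
  by_cases h18 : s = "UAC"
  · subst h18; rfl
  by_cases h19 : s = "TAT"
  · subst h19; rfl
  by_cases h20 : s = "TAC"
  · subst h20; rfl
  by_cases h21 : s = "UAA"
  · subst h21; rfl
  by_cases h22 : s = "UAG"
  · subst h22; rfl
  by_cases h23 : s = "TAA"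
  · subst h23; rfl
  by_cases h24 : s = "TAG"
  · subst h24; rfl
  by_cases h25 : s = "UGU"
  · subst h25; rfl
  by_cases h26 : s = "UGC"
  · subst h26; rfl
  by_cases h27 : s = "TGT"
  · subst h27; rfl
  by_cases h28 : s = "TGC"
  · subst h28; rfl
  by_cases h29 : s = "UGA"
  · subst h29; rfl
  by_cases h30 : s = "TGA"
  · subst h30; rfl
  by_cases h31 : s = "UGG"
  · subst h31; rfl
  by_cases h32 : s = "TGG"
  · subst h32; rfl
  by_cases h33 : s = "CUU"
  · subst h33; rfl
  by_cases h34 : s = "CUC"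
  · subst h34; rfl
  by_cases h35 : s = "CUA"
  · subst h35; rfl
  by_cases h36 : s = "CUG"
  · subst h36; rfl
  by_cases h37 : s = "CTT"
  · subst h37; rfl
  by_cases h38 : s = "CTC"
  · subst h38; rfl
  by_cases h39 : s = "CTA"
  · subst h39; rfl
  by_cases h40 : s = "CTG"
  · subst h40; rfl
  by_cases h41 : s = "CCU"
  · subst h41; rfl
  by_cases h42 : s = "CCC"
  · subst h42; rfl
  by_cases h43 : s = "CCA"
  · subst h43; rfl
  by_cases h44 : s = "CCG"
  · subst h44; rfl
  by_cases h45 : s = "CCT"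
  · subst h45; rfl
  by_cases h46 : s = "CAU"
  · subst h46; rfl
  by_cases h47 : s = "CAC"
  · subst h47; rfl
  by_cases h48 : s = "CAT"
  · subst h48; rfl
  by_cases h49 : s = "CAA"
  · subst h49; rfl
  by_cases h50 : s = "CAG"
  · subst h50; rfl
  by_cases h51 : s = "CGU"
  · subst h51; rfl
  by_cases h52 : s = "CGC"
  · subst h52; rfl
  by_cases h53 : s = "CGA"
  · subst h53; rfl
  by_cases h54 : s = "CGG"
  · subst h54; rfl
  by_cases h55 : s = "CGT"
  · subst h55; rfl
  by_cases h56 : s = "AUU"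
  · subst h56; rfl
  by_cases h57 : s = "AUC"
  · subst h57; rfl
  by_cases h58 : s = "AUA"
  · subst h58; rfl
  by_cases h59 : s = "ATT"
  · subst h59; rfl
  by_cases h60 : s = "ATC"
  · subst h60; rfl
  by_cases h61 : s = "ATA"
  · subst h61; rfl
  by_cases h62 : s = "AUG"
  · subst h62; rfl
  by_cases h63 : s = "ATG"
  · subst h63; rfl
  by_cases h64 : s = "ACU"
  · subst h64; rfl
  by_cases h65 : s = "ACC"
  · subst h65; rfl
  by_cases h66 : s = "ACA"
  · subst h66; rfl
  by_cases h67 : s = "ACG"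
  · subst h67; rfl
  by_cases h68 : s = "ACT"
  · subst h68; rfl
  by_cases h69 : s = "AAU"
  · subst h69; rfl
  by_cases h70 : s = "AAC"
  · subst h70; rfl
  by_cases h71 : s = "AAT"
  · subst h71; rfl
  by_cases h72 : s = "AAA"
  · subst h72; rfl
  by_cases h73 : s = "AAG"
  · subst h73; rfl
  by_cases h74 : s = "AGU"
  · subst h74; rfl
  by_cases h75 : s = "AGC"
  · subst h75; rfl
  by_cases h76 : s = "AGT"
  · subst h76; rfl
  by_cases h77 : s = "AGA"
  · subst h77; rfl
  by_cases h78 : s = "AGG"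
  · subst h78; rfl
  by_cases h79 : s = "GUU"
  · subst h79; rfl
  by_cases h80 : s = "GUC"
  · subst h80; rfl
  by_cases h81 : s = "GUA"
  · subst h81; rfl
  by_cases h82 : s = "GUG"
  · subst h82; rfl
  by_cases h83 : s = "GTT"
  · subst h83; rfl
  by_cases h84 : s = "GTC"
  · subst h84; rfl
  by_cases h85 : s = "GTA"
  · subst h85; rfl
  by_cases h86 : s = "GTG"
  · subst h86; rfl
  by_cases h87 : s = "GCU"
  · subst h87; rfl
  by_cases h88 : s = "GCC"
  · subst h88; rfl
  by_cases h89 : s = "GCA"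
  · subst h89; rfl
  by_cases h90 : s = "GCG"
  · subst h90; rfl
  by_cases h91 : s = "GCT"
  · subst h91; rfl
  by_cases h92 : s = "GAU"
  · subst h92; rfl
  by_cases h93 : s = "GAC"
  · subst h93; rfl
  by_cases h94 : s = "GAT"
  · subst h94; rfl
  by_cases h95 : s = "GAA"
  · subst h95; rfl
  by_cases h96 : s = "GAG"
  · subst h96; rfl
  by_cases h97 : s = "GGU"
  · subst h97; rfl
  by_cases h98 : s = "GGC"
  · subst h98; rfl
  by_cases h99 : s = "GGA"
  · subst h99; rfl
  by_cases h100 : s = "GGG"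
  · subst h100; rfl
  by_cases h101 : s = "GGT"
  · subst h101; rfl
  have hb0 : ("UUU" == s) = false := by rw [beq_eq_false_iff_ne]; exact fun e => h0 e.symm
  have hb1 : ("UUC" == s) = false := by rw [beq_eq_false_iff_ne]; exact fun e => h1 e.symm
  have hb2 : ("TTT" == s) = false := by rw [beq_eq_false_iff_ne]; exact fun e => h2 e.symm
  have hb3 : ("TTC" == s) = false := by rw [beq_eq_false_iff_ne]; exact fun e => h3 e.symm
  have hb4 : ("T\nT\nT" == s) = false := by rw [beq_eq_false_iff_ne]; exact fun e => h4 e.symm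
  have hb5 : ("UUA" == s) = false := by rw [beq_eq_false_iff_ne]; exact fun e => h5 e.symm
  have hb6 : ("UUG" == s) = false := by rw [beq_eq_false_iff_ne]; exact fun e => h6 e.symm
  have hb7 : ("TTA" == s) = false := by rw [beq_eq_false_iff_ne]; exact fun e => h7 e.symm
  have hb8 : ("TTG" == s) = false := by rw [beq_eq_false_iff_ne]; exact fun e => h8 e.symm
  have hb9 : ("UCU" == s) = false := by rw [beq_eq_false_iff_ne]; exact fun e => h9 e.symm
  have hb10 : ("UCC" == s) = false := by rw [beq_eq_false_iff_ne]; exact fun e => h10 e.symm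
  have hb11 : ("UCA" == s) = false := by rw [beq_eq_false_iff_ne]; exact fun e => h11 e.symm
  have hb12 : ("UCG" == s) = false := by rw [beq_eq_false_iff_ne]; exact fun e => h12 e.symm
  have hb13 : ("TCT" == s) = false := by rw [beq_eq_false_iff_ne]; exact fun e => h13 e.symm
  have hb14 : ("TCC" == s) = false := by rw [beq_eq_false_iff_ne]; exact fun e => h14 e.symm
  have hb15 : ("TCA" == s) = false := by rw [beq_eq_false_iff_ne]; exact fun e => h15 e.symm
  have hb16 : ("TCG" == s) = false := by rw [beq_eq_false_iff_ne]; exact fun e => h16 e.symm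
  have hb17 : ("UAU" == s) = false := by rw [beq_eq_false_iff_ne]; exact fun e => h17 e.symm
  have hb18 : ("UAC" == s) = false := by rw [beq_eq_false_iff_ne]; exact fun e => h18 e.symm
  have hb19 : ("TAT" == s) = false := by rw [beq_eq_false_iff_ne]; exact fun e => h19 e.symm
  have hb20 : ("TAC" == s) = false := by rw [beq_eq_false_iff_ne]; exact fun e => h20 e.symm
  have hb21 : ("UAA" == s) = false := by rw [beq_eq_false_iff_ne]; exact fun e => h21 e.symm
  have hb22 : ("UAG" == s) = false := by rw [beq_eq_false_iff_ne]; exact fun e => h22 e.symm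
  have hb23 : ("TAA" == s) = false := by rw [beq_eq_false_iff_ne]; exact fun e => h23 e.symm
  have hb24 : ("TAG" == s) = false := by rw [beq_eq_false_iff_ne]; exact fun e => h24 e.symm
  have hb25 : ("UGU" == s) = false := by rw [beq_eq_false_iff_ne]; exact fun e => h25 e.symm
  have hb26 : ("UGC" == s) = false := by rw [beq_eq_false_iff_ne]; exact fun e => h26 e.symm
  have hb27 : ("TGT" == s) = false := by rw [beq_eq_false_iff_ne]; exact fun e => h27 e.symm
  have hb28 : ("TGC" == s) = false := by rw [beq_eq_false_iff_ne]; exact fun e => h28 e.symm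
  have hb29 : ("UGA" == s) = false := by rw [beq_eq_false_iff_ne]; exact fun e => h29 e.symm
  have hb30 : ("TGA" == s) = false := by rw [beq_eq_false_iff_ne]; exact fun e => h30 e.symm
  have hb31 : ("UGG" == s) = false := by rw [beq_eq_false_iff_ne]; exact fun e => h31 e.symm
  have hb32 : ("TGG" == s) = false := by rw [beq_eq_false_iff_ne]; exact fun e => h32 e.symm
  have hb33 : ("CUU" == s) = false := by rw [beq_eq_false_iff_ne]; exact fun e => h33 e.symm
  have hb34 : ("CUC" == s) = false := by rw [beq_eq_false_iff_ne]; exact fun e => h34 e.symm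
  have hb35 : ("CUA" == s) = false := by rw [beq_eq_false_iff_ne]; exact fun e => h35 e.symm
  have hb36 : ("CUG" == s) = false := by rw [beq_eq_false_iff_ne]; exact fun e => h36 e.symm
  have hb37 : ("CTT" == s) = false := by rw [beq_eq_false_iff_ne]; exact fun e => h37 e.symm
  have hb38 : ("CTC" == s) = false := by rw [beq_eq_false_iff_ne]; exact fun e => h38 e.symm
  have hb39 : ("CTA" == s) = false := by rw [beq_eq_false_iff_ne]; exact fun e => h39 e.symm
  have hb40 : ("CTG" == s) = false := by rw [beq_eq_false_iff_ne]; exact fun e => h40 e.symm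
  have hb41 : ("CCU" == s) = false := by rw [beq_eq_false_iff_ne]; exact fun e => h41 e.symm
  have hb42 : ("CCC" == s) = false := by rw [beq_eq_false_iff_ne]; exact fun e => h42 e.symm
  have hb43 : ("CCA" == s) = false := by rw [beq_eq_false_iff_ne]; exact fun e => h43 e.symm
  have hb44 : ("CCG" == s) = false := by rw [beq_eq_false_iff_ne]; exact fun e => h44 e.symm
  have hb45 : ("CCT" == s) = false := by rw [beq_eq_false_iff_ne]; exact fun e => h45 e.symm
  have hb46 : ("CAU" == s) = false := by rw [beq_eq_false_iff_ne]; exact fun e => h46 e.symm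
  have hb47 : ("CAC" == s) = false := by rw [beq_eq_false_iff_ne]; exact fun e => h47 e.symm
  have hb48 : ("CAT" == s) = false := by rw [beq_eq_false_iff_ne]; exact fun e => h48 e.symm
  have hb49 : ("CAA" == s) = false := by rw [beq_eq_false_iff_ne]; exact fun e => h49 e.symm
  have hb50 : ("CAG" == s) = false := by rw [beq_eq_false_iff_ne]; exact fun e => h50 e.symm
  have hb51 : ("CGU" == s) = false := by rw [beq_eq_false_iff_ne]; exact fun e => h51 e.symm
  have hb52 : ("CGC" == s) = false := by rw [beq_eq_false_iff_ne]; exact fun e => h52 e.symm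
  have hb53 : ("CGA" == s) = false := by rw [beq_eq_false_iff_ne]; exact fun e => h53 e.symm
  have hb54 : ("CGG" == s) = false := by rw [beq_eq_false_iff_ne]; exact fun e => h54 e.symm
  have hb55 : ("CGT" == s) = false := by rw [beq_eq_false_iff_ne]; exact fun e => h55 e.symm
  have hb56 : ("AUU" == s) = false := by rw [beq_eq_false_iff_ne]; exact fun e => h56 e.symm
  have hb57 : ("AUC" == s) = false := by rw [beq_eq_false_iff_ne]; exact fun e => h57 e.symm
  have hb58 : ("AUA" == s) = false := by rw [beq_eq_false_iff_ne]; exact fun e => h58 e.symm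
  have hb59 : ("ATT" == s) = false := by rw [beq_eq_false_iff_ne]; exact fun e => h59 e.symm
  have hb60 : ("ATC" == s) = false := by rw [beq_eq_false_iff_ne]; exact fun e => h60 e.symm
  have hb61 : ("ATA" == s) = false := by rw [beq_eq_false_iff_ne]; exact fun e => h61 e.symm
  have hb62 : ("AUG" == s) = false := by rw [beq_eq_false_iff_ne]; exact fun e => h62 e.symm
  have hb63 : ("ATG" == s) = false := by rw [beq_eq_false_iff_ne]; exact fun e => h63 e.symm
  have hb64 : ("ACU" == s) = false := by rw [beq_eq_false_iff_ne]; exact fun e => h64 e.symm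
  have hb65 : ("ACC" == s) = false := by rw [beq_eq_false_iff_ne]; exact fun e => h65 e.symm
  have hb66 : ("ACA" == s) = false := by rw [beq_eq_false_iff_ne]; exact fun e => h66 e.symm
  have hb67 : ("ACG" == s) = false := by rw [beq_eq_false_iff_ne]; exact fun e => h67 e.symm
  have hb68 : ("ACT" == s) = false := by rw [beq_eq_false_iff_ne]; exact fun e => h68 e.symm
  have hb69 : ("AAU" == s) = false := by rw [beq_eq_false_iff_ne]; exact fun e => h69 e.symm
  have hb70 : ("AAC" == s) = false := by rw [beq_eq_false_iff_ne]; exact fun e => h70 e.symm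
  have hb71 : ("AAT" == s) = false := by rw [beq_eq_false_iff_ne]; exact fun e => h71 e.symm
  have hb72 : ("AAA" == s) = false := by rw [beq_eq_false_iff_ne]; exact fun e => h72 e.symm
  have hb73 : ("AAG" == s) = false := by rw [beq_eq_false_iff_ne]; exact fun e => h73 e.symm
  have hb74 : ("AGU" == s) = false := by rw [beq_eq_false_iff_ne]; exact fun e => h74 e.symm
  have hb75 : ("AGC" == s) = false := by rw [beq_eq_false_iff_ne]; exact fun e => h75 e.symm
  have hb76 : ("AGT" == s) = false := by rw [beq_eq_false_iff_ne]; exact fun e => h76 e.symm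
  have hb77 : ("AGA" == s) = false := by rw [beq_eq_false_iff_ne]; exact fun e => h77 e.symm
  have hb78 : ("AGG" == s) = false := by rw [beq_eq_false_iff_ne]; exact fun e => h78 e.symm
  have hb79 : ("GUU" == s) = false := by rw [beq_eq_false_iff_ne]; exact fun e => h79 e.symm
  have hb80 : ("GUC" == s) = false := by rw [beq_eq_false_iff_ne]; exact fun e => h80 e.symm
  have hb81 : ("GUA" == s) = false := by rw [beq_eq_false_iff_ne]; exact fun e => h81 e.symm
  have hb82 : ("GUG" == s) = false := by rw [beq_eq_false_iff_ne]; exact fun e => h82 e.symm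
  have hb83 : ("GTT" == s) = false := by rw [beq_eq_false_iff_ne]; exact fun e => h83 e.symm
  have hb84 : ("GTC" == s) = false := by rw [beq_eq_false_iff_ne]; exact fun e => h84 e.symm
  have hb85 : ("GTA" == s) = false := by rw [beq_eq_false_iff_ne]; exact fun e => h85 e.symm
  have hb86 : ("GTG" == s) = false := by rw [beq_eq_false_iff_ne]; exact fun e => h86 e.symm
  have hb87 : ("GCU" == s) = false := by rw [beq_eq_false_iff_ne]; exact fun e => h87 e.symm
  have hb88 : ("GCC" == s) = false := by rw [beq_eq_false_iff_ne]; exact fun e => h88 e.symm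
  have hb89 : ("GCA" == s) = false := by rw [beq_eq_false_iff_ne]; exact fun e => h89 e.symm
  have hb90 : ("GCG" == s) = false := by rw [beq_eq_false_iff_ne]; exact fun e => h90 e.symm
  have hb91 : ("GCT" == s) = false := by rw [beq_eq_false_iff_ne]; exact fun e => h91 e.symm
  have hb92 : ("GAU" == s) = false := by rw [beq_eq_false_iff_ne]; exact fun e => h92 e.symm
  have hb93 : ("GAC" == s) = false := by rw [beq_eq_false_iff_ne]; exact fun e => h93 e.symm
  have hb94 : ("GAT" == s) = false := by rw [beq_eq_false_iff_ne]; exact fun e => h94 e.symm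
  have hb95 : ("GAA" == s) = false := by rw [beq_eq_false_iff_ne]; exact fun e => h95 e.symm
  have hb96 : ("GAG" == s) = false := by rw [beq_eq_false_iff_ne]; exact fun e => h96 e.symm
  have hb97 : ("GGU" == s) = false := by rw [beq_eq_false_iff_ne]; exact fun e => h97 e.symm
  have hb98 : ("GGC" == s) = false := by rw [beq_eq_false_iff_ne]; exact fun e => h98 e.symm
  have hb99 : ("GGA" == s) = false := by rw [beq_eq_false_iff_ne]; exact fun e => h99 e.symm
  have hb100 : ("GGG" == s) = false := by rw [beq_eq_false_iff_ne]; exact fun e => h100 e.symm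
  have hb101 : ("GGT" == s) = false := by rw [beq_eq_false_iff_ne]; exact fun e => h101 e.symm
  simp only [knowcodon, codonName, PySem.Dict.getD, PySem.Dict.get?_mk_cons, h0, h1, h2, h3, h4, h5, h6, h7, h8, h9, h10, h11, h12, h13, h14, h15, h16, h17, h18, h19, h20, h21, h22, h23, h24, h25, h26, h27, h28, h29, h30, h31, h32, h33, h34, h35, h36, h37, h38, h39, h40, h41, h42, h43, h44, h45, h46, h47, h48, h49, h50, h51, h52, h53, h54, h55, h56, h57, h58, h59, h60, h61, h62, h63, h64, h65, h66, h67, h68, h69, h70, h71, h72, h73, h74, h75, h76, h77, h78, h79, h80, h81, h82, h83, h84, h85, h86, h87, h88, h89, h90, h91, h92, h93, h94, h95, h96, h97, h98, h99, h100, h101, hb0, hb1, hb2, hb3, hb4, hb5, hb6, hb7, hb8, hb9, hb10, hb11, hb12, hb13, hb14, hb15, hb16, hb17, hb18, hb19, hb20, hb21, hb22, hb23, hb24, hb25, hb26, hb27, hb28, hb29, hb30, hb31, hb32, hb33, hb34, hb35, hb36, hb37, hb38, hb39, hb40, hb41, hb42, hb43, hb44, hb45, hb46, hb47, hb48, hb49,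 hb50, hb51, hb52, hb53, hb54, hb55, hb56, hb57, hb58, hb59, hb60, hb61, hb62, hb63, hb64, hb65, hb66, hb67, hb68, hb69, hb70, hb71, hb72, hb73, hb74, hb75, hb76, hb77, hb78, hb79, hb80, hb81, hb82, hb83, hb84, hb85, hb86, hb87, hb88, hb89, hb90, hb91, hb92, hb93, hb94, hb95, hb96, hb97, hb98, hb99, hb100, hb101,
    Bool.false_eq_true, if_false, or_self]
  rfl

-- B's peeling translation, written as the indexed chunk list A's comprehension builds.
theorem translate_eq_range : ∀ (n : Nat) (cs : List Char), cs.length ≤ n →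
    translateChunks cs = (List.range ((cs.length + 2) / 3)).map
      (fun k => codonName.getD (String.ofList ((cs.drop (3 * k)).take 3)) "不能识别") := by
  intro n
  induction n with
  | zero =>
    intro cs h
    have : cs = [] := List.eq_nil_of_length_eq_zero (by omega)
    subst this
    simp [translateChunks]
  | succ n ih =>
    intro cs h
    match cs with
    | [] => simp [translateChunks]
    | c :: cs' =>
      rw [translateChunks]
      have hlen : ((c :: cs').length + 2) / 3 = (((c :: cs').drop 3).length + 2) / 3 + 1 := by
        rw [List.length_drop]; simp only [List.length_cons]; omega
      rw [hlen, List.range_succ_eq_map, List.map_cons, List.map_map]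
      refine congrArg₂ List.cons ?_ ?_
      · simp
      · rw [ih ((c :: cs').drop 3) (by rw [List.length_drop]; omega)]
        refine List.map_congr_left ?_
        intro k hk
        have h3 : 3 * (k + 1) = 3 + 3 * k := by ring
        simp only [Function.comp_apply, List.drop_drop]
        rw [h3]

-- the chunk list A's comprehension builds, translated codon-by-codon, is B's translation
theorem map_knowcodon_pyChunks (s : String) :
    (pyChunks s).map knowcodon = translateChunks s.toList := by
  have hk : ∀ t : String, knowcodon t = codonName.getD t "不能识别" := knowcodon_eq_getD
  rw [translate_eq_range s.toList.length s.toList le_rfl]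
  unfold pyChunks
  rw [PySem.List.pyRange_of_pos 0 (PySem.Str.len s) (by omega), List.map_map, List.map_map]
  have hlen : PySem.Str.len s = (s.toList.length : Int) := by
    simp [PySem.Str.len_eq]
  have hcnt : (if (0:Int) < PySem.Str.len s then ((PySem.Str.len s - 0 + 3 - 1) / 3).toNat else 0)
      = (s.toList.length + 2) / 3 := by
    rw [hlen]
    split
    · omega
    · omega
  rw [hcnt]
  refine List.map_congr_left ?_
  intro k hk'
  simp only [Function.comp_apply, hk]
  congr 1
  have hcast : (0 : Int) + 3 * (k : Int) = ((3 * k : Nat) : Int) := by push_cast; ring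
  have hsl : (PySem.Str.slice s (some ((0:Int) + 3 * (k:Int))) (some ((0:Int) + 3 * (k:Int) + 3))).toList
      = (s.toList.drop (3 * k)).take 3 := by
    rw [hcast]
    rw [show ((3 * k : Nat) : Int) + (3 : Int) = ((3 * k + 3 : Nat) : Int) by push_cast; ring]
    rw [PySem.Str.toList_slice]
    simp only [PySem.Chars.slice_eq_listSlice, PySem.List.slice_natCast]
    congr 1
    omega
  rw [← hsl]
  exact String.ofList_toList.symm

theorem isproteinLoop_cons (xs ys : List String) (i : Int) (rest : List Int) :
    isproteinLoop xs ys (i :: rest) =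
      match PySem.List.pyGet? xs i, PySem.List.pyGet? ys i with
      | some a, some b => if knowcodon a ≠ knowcodon b then "error" else isproteinLoop xs ys rest
      | _, _ => "error" := by
  rfl

-- A's indexed max-length loop, characterised: it compares the two translated chunk lists.
theorem loop_eq (xs ys : List String) : ∀ (n i : Nat), max xs.length ys.length - i = n →
    isproteinLoop xs ys (PySem.List.pyRange (i : Int) ((max xs.length ys.length : Nat) : Int) 1)
      = if (xs.drop i).map knowcodon = (ys.drop i).map knowcodon then "right" else "error" := by
  intro n
  induction n with
  | zero =>
    intro i h
    have hge : max xs.length ys.length ≤ i := by omega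
    rw [PySem.List.pyRange_one_eq_nil (by exact_mod_cast hge)]
    have hx : xs.drop i = [] := List.drop_eq_nil_of_le (by omega)
    have hy : ys.drop i = [] := List.drop_eq_nil_of_le (by omega)
    simp [isproteinLoop, hx, hy]
  | succ n ih =>
    intro i h
    have hlt : i < max xs.length ys.length := by omega
    rw [PySem.List.pyRange_one_cons (by exact_mod_cast hlt)]
    have hcast : (i : Int) + 1 = ((i + 1 : Nat) : Int) := by push_cast; ring
    rw [hcast]
    cases hx : xs[i]? with
    | some a =>
      cases hy : ys[i]? with
      | some b =>
        obtain ⟨hxl, hxa⟩ := List.getElem?_eq_some_iff.mp hx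
        obtain ⟨hyl, hya⟩ := List.getElem?_eq_some_iff.mp hy
        have dx : xs.drop i = a :: xs.drop (i + 1) := by
          rw [List.drop_eq_getElem_cons hxl, hxa]
        have dy : ys.drop i = b :: ys.drop (i + 1) := by
          rw [List.drop_eq_getElem_cons hyl, hya]
        have hrec := ih (i + 1) (by omega)
        rw [isproteinLoop_cons, PySem.List.pyGet?_natCast, PySem.List.pyGet?_natCast, hx, hy]
        rw [dx, dy, List.map_cons, List.map_cons]
        by_cases hckn : knowcodon a = knowcodon b
        · simp only [hckn, ne_eq, not_true_eq_false, if_false, hrec, List.cons_eq_cons,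
            true_and]
        · simp [hckn]
      | none =>
        have hyl : ys.length ≤ i := by
          have := List.getElem?_eq_none_iff.mp hy; omega
        obtain ⟨hxl, hxa⟩ := List.getElem?_eq_some_iff.mp hx
        have dy : ys.drop i = [] := List.drop_eq_nil_of_le hyl
        have dx : xs.drop i = a :: xs.drop (i + 1) := by
          rw [List.drop_eq_getElem_cons hxl, hxa]
        rw [isproteinLoop_cons, PySem.List.pyGet?_natCast, PySem.List.pyGet?_natCast, hx, hy]
        simp [dx, dy]
    | none =>
      have hxl : xs.length ≤ i := by
        have := List.getElem?_eq_none_iff.mp hx; omega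
      have dx : xs.drop i = [] := List.drop_eq_nil_of_le hxl
      have hyl : i < ys.length := by omega
      have dy : ys.drop i = ys[i] :: ys.drop (i + 1) := List.drop_eq_getElem_cons hyl
      rw [isproteinLoop_cons, PySem.List.pyGet?_natCast, PySem.List.pyGet?_natCast, hx]
      cases hyv : ys[i]? with
      | none => exact absurd (List.getElem?_eq_none_iff.mp hyv) (by omega)
      | some b =>
        rw [dx, dy]
        have hcond : ¬ (List.map knowcodon ([] : List String)
            = List.map knowcodon (ys[i] :: ys.drop (i + 1))) := by
          simp only [List.map_nil, List.map_cons]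
          exact fun hcontra => by simpa using congrArg List.length hcontra
        rw [if_neg hcond]

theorem isprotein_spec : Claim_equal_isprotein := by
  intro old new _
  show isprotein old new = isprotein_alt old new
  simp only [isprotein, isprotein_alt]
  have hmax : max ((pyChunks old).length : Int) ((pyChunks new).length : Int)
      = ((max (pyChunks old).length (pyChunks new).length : Nat) : Int) := by
    push_cast; rfl
  have h0 : (0 : Int) = ((0 : Nat) : Int) := rfl
  rw [hmax, h0, loop_eq (pyChunks old) (pyChunks new) (max (pyChunks old).length (pyChunks new).length) 0 (by omega)]
  simp only [List.drop_zero, map_knowcodon_pyChunks]
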